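-- pv_equiv track=rewrite | github.com/JeongtaekLim/TIL | Python/Tutorial/42840_math_forgiver.py | solution
-- ===== SOURCE A (Python) =====
-- from functools import cmp_to_key
--
-- def solution(answers):
--     pattern = [[1, 2, 3, 4, 5], [2, 1, 2, 3, 2, 4, 2, 5], [3, 3, 1, 1, 2, 2, 4, 4, 5, 5]]
--     score = [[0, 0], [1, 0], [2, 0]]
--     for ans_idx, ans in enumerate(answers):
--         for p_idx, p in enumerate(pattern):
--             if p[ans_idx % len(p)] == ans:
--                 score[p_idx][1] += 1
--     score = sorted(score, key=cmp_to_key(lambda x, y: y[1] - x[1]))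
--     answer = []
--     for idx, s in enumerate(score):
--         if len(answer) == 0:
--             answer.append(s[0]+1)
--             continue
--         if score[idx-1][1] == s[1]:
--             answer.append(s[0]+1)
--         else:
--             break
--     answer.sort()
--     return answer
-- ===== SOURCE B (Python) =====
-- def solution(answers):
--     patterns = [[1, 2, 3, 4, 5], [2, 1, 2, 3, 2, 4, 2, 5], [3, 3, 1, 1, 2, 2, 4, 4, 5, 5]]
--     scores = [sum(1 for i, a in enumerate(answers) if a == p[i % len(p)]) for p in patterns]
--     best = max(scores)
--     return [i + 1 for i, s in enumerate(scores) if s == best]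
-- ===== Notes on version B (the rewrite author's own statement) =====
-- stated objective: simpler
-- what changed: Scores are tallied pattern-by-pattern with one sum comprehension per pattern (no mutable score table), and the winners are picked by max-and-filter in index order instead of a cmp_to_key sort followed by a break-based tie-collecting walk and a final re-sort.
import Mathlib
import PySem

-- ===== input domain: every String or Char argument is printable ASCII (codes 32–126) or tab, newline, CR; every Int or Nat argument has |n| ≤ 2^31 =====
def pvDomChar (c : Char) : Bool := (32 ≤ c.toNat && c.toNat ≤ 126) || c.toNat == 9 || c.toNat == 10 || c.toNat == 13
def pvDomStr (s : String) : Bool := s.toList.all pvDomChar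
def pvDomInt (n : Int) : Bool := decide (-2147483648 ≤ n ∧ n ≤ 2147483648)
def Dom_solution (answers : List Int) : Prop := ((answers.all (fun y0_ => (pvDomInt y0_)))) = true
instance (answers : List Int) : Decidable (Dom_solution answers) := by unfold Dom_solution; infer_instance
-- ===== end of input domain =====

set_option maxHeartbeats 1000000
set_option maxRecDepth 20000

-- B replaces A's mutable score table + cmp_to_key sort + break-based tie walk by
-- per-pattern sums and a max-and-filter selection (objective: simpler).

-- ===== PORT A =====
def patternA : List (List Int) := [[1,2,3,4,5],[2,1,2,3,2,4,2,5],[3,3,1,1,2,2,4,4,5,5]]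

-- the inner 'for p_idx, p in enumerate(pattern)' loop; p[ans_idx % len(p)] is always
-- in range (ans_idx ≥ 0, len p > 0), so .getD 0 after pyGet? is exact; p_idx ∈ {0,1,2}
-- is nonnegative, so .toNat on it is exact
def innerA (ansIdx ans : Int) (score : List (Int × Int)) : List (Int × Int) :=
  (PySem.List.enumerate patternA 0).foldl
    (fun sc pip =>
      if (PySem.List.pyGet? pip.2 (PySem.Int.mod ansIdx (pip.2.length : Int))).getD 0 == ans
      then sc.modify pip.1.toNat (fun s => (s.1, s.2 + 1)) else sc)
    score

-- the tie-collecting loop with its break, transcribed as recursion on the sorted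
-- list ('prev' is score[idx-1])
def collectGo (prev : Int × Int) : List (Int × Int) → List Int
  | [] => []
  | s :: rest => if prev.2 == s.2 then (s.1 + 1) :: collectGo s rest else []

def collectA : List (Int × Int) → List Int
  | [] => []
  | s :: rest => (s.1 + 1) :: collectGo s rest

def solution (answers : List Int) : List Int :=
  let score0 : List (Int × Int) := [(0, 0), (1, 0), (2, 0)]
  let score := (PySem.List.enumerate answers 0).foldl (fun sc ia => innerA ia.1 ia.2 sc) score0
  -- sorted(score, key=cmp_to_key(lambda x, y: y[1] - x[1])) is exactly the stable
  -- descending sort by the second component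
  let scoreS := PySem.List.sorted score (fun s => s.2) true
  let answer := collectA scoreS
  PySem.List.sorted answer (fun x => x) false

-- ===== PORT B =====
-- p[i % len(p)] is always in range (i ≥ 0, len p > 0), so .getD 0 after pyGet? is
-- exact; max(scores) is applied to the 3-element scores list, which is never empty,
-- so .getD 0 after max? is exact
def solution_alt (answers : List Int) : List Int :=
  let patterns : List (List Int) := [[1,2,3,4,5],[2,1,2,3,2,4,2,5],[3,3,1,1,2,2,4,4,5,5]]
  let scores := patterns.map (fun p =>
    (PySem.List.enumerate answers 0).foldl
      (fun acc ia =>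
        if ia.2 == (PySem.List.pyGet? p (PySem.Int.mod ia.1 (p.length : Int))).getD 0
        then acc + 1 else acc) (0 : Int))
  let best := (PySem.List.max? scores (fun x => x)).getD 0
  (PySem.List.enumerate scores 0).filterMap
    (fun is => if is.2 == best then some (is.1 + 1) else none)

-- ===== PRECONDITION & SPEC =====
def Spec_solution (answers : List Int) (out : List Int) : Prop := out = solution_alt answers
instance (answers : List Int) (out : List Int) : Decidable (Spec_solution answers out) := by unfold Spec_solution; infer_instance

-- ===== CLAIM (what is proved, stated in full; the proofs are below) =====
def Claim_equal_solution : Prop := ∀ (answers : List Int), Dom_solution answers → Spec_solution answers (solution answers)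

-- ===== LEMMAS AND PROOFS =====

-- the per-pattern match count over answers, indices starting at s
def cntP (p : List Int) : Int → List Int → Int
  | _, [] => 0
  | s, a :: l =>
      (if a == (PySem.List.pyGet? p (PySem.Int.mod s (p.length : Int))).getD 0 then 1 else 0)
      + cntP p (s + 1) l

theorem intBeq_comm (u v : Int) : (u == v) = (v == u) := by
  by_cases h : u = v
  · subst h; rfl
  · have h2 : ¬ v = u := fun hh => h hh.symm
    simp [h, h2]

theorem innerA_eval (s a x y z : Int) : innerA s a [(0, x), (1, y), (2, z)] =
          [(0, x + if a == (PySem.List.pyGet? [1,2,3,4,5] (PySem.Int.mod s 5)).getD 0 then 1 else 0),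
           (1, y + if a == (PySem.List.pyGet? [2,1,2,3,2,4,2,5] (PySem.Int.mod s 8)).getD 0 then 1 else 0),
           (2, z + if a == (PySem.List.pyGet? [3,3,1,1,2,2,4,4,5,5] (PySem.Int.mod s 10)).getD 0 then 1 else 0)] := by
  unfold innerA
  rw [show PySem.List.enumerate patternA 0 =
      [(0,[1,2,3,4,5]),(1,[2,1,2,3,2,4,2,5]),(2,[3,3,1,1,2,2,4,4,5,5])] from rfl]
  simp only [List.foldl_cons, List.foldl_nil, List.length_cons, List.length_nil]
  rw [intBeq_comm a, intBeq_comm a, intBeq_comm a]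
  rw [show ((0+1+1+1+1+1 : Nat) : Int) = 5 from by norm_num,
      show ((0+1+1+1+1+1+1+1+1 : Nat) : Int) = 8 from by norm_num,
      show ((0+1+1+1+1+1+1+1+1+1+1 : Nat) : Int) = 10 from by norm_num]
  generalize ((PySem.List.pyGet? [1,2,3,4,5] (PySem.Int.mod s 5)).getD 0 == a) = c0
  generalize ((PySem.List.pyGet? [2,1,2,3,2,4,2,5] (PySem.Int.mod s 8)).getD 0 == a) = c1
  generalize ((PySem.List.pyGet? [3,3,1,1,2,2,4,4,5,5] (PySem.Int.mod s 10)).getD 0 == a) = c2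
  cases c0 <;> cases c1 <;> cases c2 <;> simp [List.modify]

theorem scoreLoop (l : List Int) (s x y z : Int) :
    (PySem.List.enumerate l s).foldl (fun sc ia => innerA ia.1 ia.2 sc) [(0, x), (1, y), (2, z)]
    = [(0, x + cntP [1,2,3,4,5] s l),
       (1, y + cntP [2,1,2,3,2,4,2,5] s l),
       (2, z + cntP [3,3,1,1,2,2,4,4,5,5] s l)] := by
  induction l generalizing s x y z with
  | nil => simp [cntP, PySem.List.enumerate]
  | cons a l ih =>
      rw [PySem.List.enumerate_cons, List.foldl_cons, innerA_eval, ih]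
      simp only [cntP, List.cons.injEq, Prod.mk.injEq, List.length_cons, List.length_nil]
      norm_num
      refine ⟨by ring, by ring, by ring⟩

theorem foldB (p : List Int) (l : List Int) (s acc : Int) :
    (PySem.List.enumerate l s).foldl
      (fun acc ia =>
        if ia.2 == (PySem.List.pyGet? p (PySem.Int.mod ia.1 (p.length : Int))).getD 0
        then acc + 1 else acc) acc = acc + cntP p s l := by
  induction l generalizing s acc with
  | nil => simp [cntP, PySem.List.enumerate]
  | cons a l ih =>
      rw [PySem.List.enumerate_cons, List.foldl_cons, ih]
      simp only [cntP]
      split_ifs <;> ring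

-- the whole selection tail on three symbolic scores: sort-desc + tie-walk + sort-asc
-- equals max-and-filter
theorem tail_eq (a b c : Int) :
    PySem.List.sorted (collectA (PySem.List.sorted [(0, a), (1, b), (2, c)] (fun s => s.2) true)) (fun x => x) false
    = (PySem.List.enumerate [a, b, c] 0).filterMap
        (fun is => if is.2 == (PySem.List.max? [a, b, c] (fun x => x)).getD 0 then some (is.1 + 1) else none) := by
  by_cases hab : a < b
  · by_cases hbc : b < c
    · have hac : a < c := lt_trans hab hbc
      have hs : PySem.List.sorted [((0:Int), a), (1, b), (2, c)] (fun s => s.2) true = [(2,c),(1,b),(0,a)] := by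
        simp [PySem.List.sorted, PySem.List.insertBy, hab, hbc]
      rw [hs]
      simp [collectA, collectGo, PySem.List.sorted, PySem.List.insertBy, PySem.List.max?,
            PySem.List.enumerate, List.filterMap, hab, hbc, hac,
            hab.ne, hab.ne', hbc.ne, hbc.ne', hac.ne, hac.ne']
    · by_cases heq : b = c
      · subst heq
        have hs : PySem.List.sorted [((0:Int), a), (1, b), (2, b)] (fun s => s.2) true = [(1,b),(2,b),(0,a)] := by
          simp [PySem.List.sorted, PySem.List.insertBy, hab]
        rw [hs]
        simp [collectA, collectGo, PySem.List.sorted, PySem.List.insertBy, PySem.List.max?,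
              PySem.List.enumerate, List.filterMap, hab, hbc, hab.ne, hab.ne']
      · have hcb : c < b := lt_of_le_of_ne (not_lt.mp hbc) (fun h => heq h.symm)
        by_cases hac : a < c
        · have hs : PySem.List.sorted [((0:Int), a), (1, b), (2, c)] (fun s => s.2) true = [(1,b),(2,c),(0,a)] := by
            simp [PySem.List.sorted, PySem.List.insertBy, hab, hcb.not_gt, hac]
          rw [hs]
          simp [collectA, collectGo, PySem.List.sorted, PySem.List.insertBy, PySem.List.max?,
                PySem.List.enumerate, List.filterMap, hab, hbc, hac,
                hab.ne, hab.ne', hcb.ne, hcb.ne', hac.ne, hac.ne']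
        · have hs : PySem.List.sorted [((0:Int), a), (1, b), (2, c)] (fun s => s.2) true = [(1,b),(0,a),(2,c)] := by
            simp [PySem.List.sorted, PySem.List.insertBy, hab, hcb.not_gt, hac]
          rw [hs]
          simp [collectA, collectGo, PySem.List.sorted, PySem.List.insertBy, PySem.List.max?,
                PySem.List.enumerate, List.filterMap, hab, hbc, hac,
                hab.ne, hab.ne', hcb.ne, hcb.ne']
  · have hba : b ≤ a := not_lt.mp hab
    by_cases hac : a < c
    · have hbc : b < c := lt_of_le_of_lt hba hac
      have hs : PySem.List.sorted [((0:Int), a), (1, b), (2, c)] (fun s => s.2) true = [(2,c),(0,a),(1,b)] := by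
        simp [PySem.List.sorted, PySem.List.insertBy, hab, hac]
      rw [hs]
      simp [collectA, collectGo, PySem.List.sorted, PySem.List.insertBy, PySem.List.max?,
            PySem.List.enumerate, List.filterMap, hab, hac, hbc,
            hbc.ne, hbc.ne', hac.ne, hac.ne']
    · have hca : c ≤ a := not_lt.mp hac
      by_cases heq : a = b
      · by_cases heq2 : b = c
        · subst heq; subst heq2
          have hs : PySem.List.sorted [((0:Int), a), (1, a), (2, a)] (fun s => s.2) true = [(0,a),(1,a),(2,a)] := by
            simp [PySem.List.sorted, PySem.List.insertBy]
          rw [hs]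
          simp [collectA, collectGo, PySem.List.sorted, PySem.List.insertBy, PySem.List.max?,
                PySem.List.enumerate, List.filterMap]
        · subst heq
          have hcb : c < a := lt_of_le_of_ne hca (fun h => heq2 h.symm)
          have hs : PySem.List.sorted [((0:Int), a), (1, a), (2, c)] (fun s => s.2) true = [(0,a),(1,a),(2,c)] := by
            simp [PySem.List.sorted, PySem.List.insertBy, hcb.not_gt]
          rw [hs]
          simp [collectA, collectGo, PySem.List.sorted, PySem.List.insertBy, PySem.List.max?,
                PySem.List.enumerate, List.filterMap, hab, hac, hcb, hcb.ne, hcb.ne']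
      · have hba' : b < a := lt_of_le_of_ne hba (fun h => heq h.symm)
        by_cases hbc : b < c
        · have hs : PySem.List.sorted [((0:Int), a), (1, b), (2, c)] (fun s => s.2) true = [(0,a),(2,c),(1,b)] := by
            simp [PySem.List.sorted, PySem.List.insertBy, hab, hac, hbc]
          rw [hs]
          by_cases hacx : a = c
          · subst hacx
            simp [collectA, collectGo, PySem.List.sorted, PySem.List.insertBy, PySem.List.max?,
                  PySem.List.enumerate, List.filterMap, hab, hac, hbc, hba'.ne, hba'.ne', hbc.ne, hbc.ne']
          · have hca' : c < a := lt_of_le_of_ne hca (fun h => hacx h.symm)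
            simp [collectA, collectGo, PySem.List.sorted, PySem.List.insertBy, PySem.List.max?,
                  PySem.List.enumerate, List.filterMap, hab, hac, hbc,
                  hba'.ne, hba'.ne', hca'.ne, hca'.ne']
        · have hcbx : c < a := lt_of_le_of_lt (not_lt.mp hbc) hba'
          have hs : PySem.List.sorted [((0:Int), a), (1, b), (2, c)] (fun s => s.2) true = [(0,a),(1,b),(2,c)] := by
            simp [PySem.List.sorted, PySem.List.insertBy, hab, hac, hbc]
          rw [hs]
          simp [collectA, collectGo, PySem.List.sorted, PySem.List.insertBy, PySem.List.max?,
                PySem.List.enumerate, List.filterMap, hab, hac, hbc,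
                hba'.ne, hba'.ne', hcbx.ne, hcbx.ne']

-- ===== VERDICT (by name: the statement is the Claim_ definition above) =====
theorem solution_spec : Claim_equal_solution := by
  intro answers _
  simp only [Spec_solution, solution, solution_alt]
  rw [scoreLoop]
  simp only [List.map_cons, List.map_nil, foldB, zero_add]
  exact tail_eq _ _ _
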